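-- pv_equiv track=rewrite | github.com/lissth/Optimizacion-Multiobjetivo | OPTIMIZACION_MULTI/METAS/Metas_Obten_p2.py | Excedentes
-- ===== SOURCE A (Python) =====
-- def Excedentes(v, limInf, limSup):
--     V_ajustado = v.copy()
--     ajuste = True
--     while ajuste:
--         ajuste = False
--         for j in range(len(v)):
--             valor = V_ajustado[j]
--             if V_ajustado[j] < limInf[j]:
--                 V_ajustado[j] = 2 * limInf[j] - V_ajustado[j]
--             elif V_ajustado[j] > limSup[j]:
--                 V_ajustado[j] = 2 * limSup[j] - V_ajustado[j]
--             if valor != V_ajustado[j]: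
--                 ajuste = True
--     return V_ajustado
-- ===== SOURCE B (Python) =====
-- def Excedentes(v, limInf, limSup):
--     res = []
--     for x, lo, hi in zip(v, limInf, limSup):
--         if lo <= x <= hi:
--             res.append(x)
--         else:
--             period = 2 * (hi - lo)
--             t = (x - lo) % period
--             res.append(lo + t if t <= hi - lo else lo + period - t)
--     return res
-- ===== Notes on version B (the rewrite author's own statement) =====
-- stated objective: faster
-- what changed: Replaces A's repeated whole-vector reflection passes (loop until a pass changes nothing) with a single pass that folds each element into its [limInf,limSup] interval in closed form via a triangle-wave modulo formula.
import Mathlib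
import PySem

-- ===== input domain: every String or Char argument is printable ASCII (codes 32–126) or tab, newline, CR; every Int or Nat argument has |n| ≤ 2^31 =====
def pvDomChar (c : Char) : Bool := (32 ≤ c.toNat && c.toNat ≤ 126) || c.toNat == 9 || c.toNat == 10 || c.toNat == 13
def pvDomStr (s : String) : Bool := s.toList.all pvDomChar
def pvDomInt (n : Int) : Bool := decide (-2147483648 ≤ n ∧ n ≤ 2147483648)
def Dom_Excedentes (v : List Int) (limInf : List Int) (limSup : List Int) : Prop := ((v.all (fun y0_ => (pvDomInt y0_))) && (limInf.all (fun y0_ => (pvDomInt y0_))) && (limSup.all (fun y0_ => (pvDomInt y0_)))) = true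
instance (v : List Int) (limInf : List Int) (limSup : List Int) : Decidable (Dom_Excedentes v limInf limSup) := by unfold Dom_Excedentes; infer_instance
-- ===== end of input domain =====

-- B replaces A's repeated whole-vector reflection passes by one pass that folds each
-- element into its interval in closed form (triangle wave via modulo); objective: faster.
-- ===== PORT A =====
-- The body of A's 'for j in range(len(v))' loop; state = (V_ajustado, ajuste).
-- The reads V_ajustado[j]/limInf[j]/limSup[j] are pyGetD (in range under Pre_); the write 'V_ajustado[j] = ...' is List.set.
def pvBodyA (limInf : List Int) (limSup : List Int) (st : List Int × Bool) (j : Int) : List Int × Bool :=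
  let valor := PySem.List.pyGetD st.1 j 0
  let V1 :=
    if PySem.List.pyGetD st.1 j 0 < PySem.List.pyGetD limInf j 0 then
      st.1.set j.toNat (2 * PySem.List.pyGetD limInf j 0 - PySem.List.pyGetD st.1 j 0)
    else if PySem.List.pyGetD st.1 j 0 > PySem.List.pyGetD limSup j 0 then
      st.1.set j.toNat (2 * PySem.List.pyGetD limSup j 0 - PySem.List.pyGetD st.1 j 0)
    else st.1
  let ajuste1 := if valor ≠ PySem.List.pyGetD V1 j 0 then true else st.2
  (V1, ajuste1)

-- One full pass of A's while-body ('ajuste = False; for j in range(len(v)): ...').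
def pvPassA (limInf : List Int) (limSup : List Int) (n : Nat) (V : List Int) : List Int × Bool :=
  (PySem.List.pyRange 0 (n : Int) 1).foldl (pvBodyA limInf limSup) (V, false)

-- The 'while ajuste:' loop; the fuel is only a termination guard (under Pre_ it is never exhausted).
def pvLoopA (limInf : List Int) (limSup : List Int) (n : Nat) : Nat → List Int → List Int
  | 0, V => V
  | fuel + 1, V =>
      let st := pvPassA limInf limSup n V
      if st.2 then pvLoopA limInf limSup n fuel st.1 else st.1

def pvSumAbs (l : List Int) : Nat := l.foldl (fun a x => a + x.natAbs) 0

def Excedentes (v : List Int) (limInf : List Int) (limSup : List Int) : List Int :=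
  pvLoopA limInf limSup v.length (1 + pvSumAbs v + pvSumAbs limInf + pvSumAbs limSup) v

-- ===== PORT B =====
-- One element of Source B's loop body: the closed-form triangle-wave fold.
def pvFold (lo : Int) (hi : Int) (x : Int) : Int :=
  if lo ≤ x ∧ x ≤ hi then x
  else
    let period := 2 * (hi - lo)
    let t := PySem.Int.mod (x - lo) period
    if t ≤ hi - lo then lo + t else lo + (period - t)

def Excedentes_alt (v : List Int) (limInf : List Int) (limSup : List Int) : List Int :=
  (v.zip (limInf.zip limSup)).map (fun p => pvFold p.2.1 p.2.2 p.1)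

-- ===== PRECONDITION & SPEC =====
-- Pre_ = exactly the inputs where the Python A returns: both limit lists cover v (else IndexError),
-- and each element either has a nonempty reflection range limInf[j] < limSup[j] or already lies
-- inside its bounds (otherwise A's while loop never terminates).
def Pre_Excedentes (v : List Int) (limInf : List Int) (limSup : List Int) : Prop :=
  v.length ≤ limInf.length ∧ v.length ≤ limSup.length ∧
  ∀ j < v.length, limInf.getD j 0 < limSup.getD j 0 ∨
    (limInf.getD j 0 ≤ v.getD j 0 ∧ v.getD j 0 ≤ limSup.getD j 0)
instance (v : List Int) (limInf : List Int) (limSup : List Int) : Decidable (Pre_Excedentes v limInf limSup) := by unfold Pre_Excedentes; infer_instance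

def pvWitness_Excedentes : List Int × List Int × List Int := ([7, -3, 2], [0, 0, 2], [5, 4, 2])

def Spec_Excedentes (v : List Int) (limInf : List Int) (limSup : List Int) (out : List Int) : Prop := out = Excedentes_alt v limInf limSup
instance (v : List Int) (limInf : List Int) (limSup : List Int) (out : List Int) : Decidable (Spec_Excedentes v limInf limSup out) := by unfold Spec_Excedentes; infer_instance

-- ===== CLAIM (what is proved, stated in full; the proofs are below) =====
def Claim_equal_Excedentes : Prop := ∀ (v : List Int) (limInf : List Int) (limSup : List Int), Dom_Excedentes v limInf limSup → Pre_Excedentes v limInf limSup → Spec_Excedentes v limInf limSup (Excedentes v limInf limSup)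
-- ===== LEMMAS AND PROOFS =====

-- One reflection step of A's pass, per element.
def pvStep (lo : Int) (hi : Int) (x : Int) : Int :=
  if x < lo then 2 * lo - x else if x > hi then 2 * hi - x else x

-- Distance of x to [lo, hi]: the variant of A's while loop.
def pvDist (lo : Int) (hi : Int) (x : Int) : Nat :=
  (if x < lo then lo - x else if x > hi then x - hi else 0).toNat

-- V_ajustado after the first k iterations of one pass of A.
def pvStepPrefix (L : List Int) (S : List Int) (V : List Int) : Nat → List Int
  | 0 => V
  | k + 1 => (pvStepPrefix L S V k).set k (pvStep (L.getD k 0) (S.getD k 0) (V.getD k 0))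

-- The 'ajuste' flag after the first k iterations of one pass of A (on V).
def pvFlag (L : List Int) (S : List Int) (V : List Int) (k : Nat) : Bool :=
  (List.range k).any fun j => decide (V.getD j 0 ≠ pvStep (L.getD j 0) (S.getD j 0) (V.getD j 0))

-- What one whole pass of A computes elementwise on the first n entries.
def pvTarget (L : List Int) (S : List Int) (n : Nat) (V : List Int) : List Int :=
  (List.range n).map fun j => pvFold (L.getD j 0) (S.getD j 0) (V.getD j 0)

theorem pvStep_id (lo hi x : Int) (h1 : lo ≤ x) (h2 : x ≤ hi) : pvStep lo hi x = x := by
  unfold pvStep; split_ifs <;> omega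

theorem pvStep_fix (lo hi x : Int) (h : pvStep lo hi x = x) : lo ≤ x ∧ x ≤ hi := by
  unfold pvStep at h; split_ifs at h <;> omega

theorem pvDist_step (lo hi x : Int) (hlt : lo < hi) (hout : ¬ (lo ≤ x ∧ x ≤ hi)) :
    pvDist lo hi (pvStep lo hi x) < pvDist lo hi x := by
  unfold pvStep pvDist
  split_ifs <;> omega

theorem pvDist_in (lo hi x : Int) (h1 : lo ≤ x) (h2 : x ≤ hi) : pvDist lo hi x = 0 := by
  unfold pvDist; split_ifs <;> omega

theorem pvFold_in (lo hi x : Int) (h1 : lo ≤ x) (h2 : x ≤ hi) : pvFold lo hi x = x := by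
  simp [pvFold, h1, h2]

theorem pv_neg_mod (u m : Int) (hm : 0 < m) :
    PySem.Int.mod (-u) m = if PySem.Int.mod u m = 0 then 0 else m - PySem.Int.mod u m := by
  rw [PySem.Int.mod_eq_emod_of_pos hm, PySem.Int.mod_eq_emod_of_pos hm]
  have h1 : 0 ≤ u % m := Int.emod_nonneg u (by omega)
  have h2 : u % m < m := Int.emod_lt_of_pos u hm
  have key : (-u) % m = (m - u % m) % m := by
    rw [Int.sub_emod m (u % m) m, Int.emod_self, Int.emod_emod_of_dvd u (dvd_refl m),
      show (-u) = 0 - u from by ring, Int.sub_emod 0 u m, Int.zero_emod]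
  rw [key]
  by_cases h0 : u % m = 0
  · simp [h0]
  · rw [Int.emod_eq_of_lt (by omega) (by omega)]
    simp [h0]

theorem pvFold_min (lo hi x : Int) (hlt : lo < hi) :
    pvFold lo hi x = lo + min (PySem.Int.mod (x - lo) (2 * (hi - lo))) (2 * (hi - lo) - PySem.Int.mod (x - lo) (2 * (hi - lo))) := by
  have hm : (0 : Int) < 2 * (hi - lo) := by omega
  have h1 : 0 ≤ PySem.Int.mod (x - lo) (2 * (hi - lo)) := by
    rw [PySem.Int.mod_eq_emod_of_pos hm]; exact Int.emod_nonneg _ (by omega)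
  have h2 : PySem.Int.mod (x - lo) (2 * (hi - lo)) < 2 * (hi - lo) := by
    rw [PySem.Int.mod_eq_emod_of_pos hm]; exact Int.emod_lt_of_pos _ hm
  unfold pvFold
  by_cases hin : lo ≤ x ∧ x ≤ hi
  · have ht : PySem.Int.mod (x - lo) (2 * (hi - lo)) = x - lo := by
      rw [PySem.Int.mod_eq_emod_of_pos hm]
      exact Int.emod_eq_of_lt (by omega) (by omega)
    simp only [hin, ht]
    omega
  · simp only [hin, if_false]
    split_ifs <;> omega

theorem pvFold_step (lo hi x : Int) (hlt : lo < hi) :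
    pvFold lo hi (pvStep lo hi x) = pvFold lo hi x := by
  have hm : (0 : Int) < 2 * (hi - lo) := by omega
  have h1 : 0 ≤ PySem.Int.mod (x - lo) (2 * (hi - lo)) := by
    rw [PySem.Int.mod_eq_emod_of_pos hm]; exact Int.emod_nonneg _ (by omega)
  have h2 : PySem.Int.mod (x - lo) (2 * (hi - lo)) < 2 * (hi - lo) := by
    rw [PySem.Int.mod_eq_emod_of_pos hm]; exact Int.emod_lt_of_pos _ hm
  unfold pvStep
  split_ifs with hlo hhi
  · -- x < lo: reflected about lo; (2*lo - x) - lo = -(x - lo)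
    rw [pvFold_min lo hi _ hlt, pvFold_min lo hi x hlt]
    rw [show 2 * lo - x - lo = -(x - lo) from by ring, pv_neg_mod (x - lo) _ hm]
    split_ifs with h0 <;> omega
  · -- x > hi: reflected about hi; (2*hi - x) - lo = -(x - lo) + period
    rw [pvFold_min lo hi _ hlt, pvFold_min lo hi x hlt]
    have he : PySem.Int.mod (2 * hi - x - lo) (2 * (hi - lo)) = PySem.Int.mod (-(x - lo)) (2 * (hi - lo)) := by
      rw [show 2 * hi - x - lo = -(x - lo) + 2 * (hi - lo) * 1 from by ring,
        PySem.Int.mod_eq_emod_of_pos hm, PySem.Int.mod_eq_emod_of_pos hm, Int.add_mul_emod_self_left]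
    rw [he, pv_neg_mod (x - lo) _ hm]
    split_ifs with h0 <;> omega
  · rfl

theorem pvStepPrefix_length (L S V : List Int) (k : Nat) :
    (pvStepPrefix L S V k).length = V.length := by
  induction k with
  | zero => rfl
  | succ k ih => simp [pvStepPrefix, ih]

theorem pvStepPrefix_getD (L S V : List Int) (k j : Nat) (hj : j < V.length) :
    (pvStepPrefix L S V k).getD j 0 =
      if j < k then pvStep (L.getD j 0) (S.getD j 0) (V.getD j 0) else V.getD j 0 := by
  induction k with
  | zero => simp [pvStepPrefix]
  | succ k ih =>
    have e : pvStepPrefix L S V (k + 1) =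
        (pvStepPrefix L S V k).set k (pvStep (L.getD k 0) (S.getD k 0) (V.getD k 0)) := rfl
    rw [e, List.getD_eq_getElem?_getD, List.getElem?_set, pvStepPrefix_length]
    by_cases hjk : k = j
    · subst hjk
      rw [if_pos rfl, if_pos hj]
      simp
    · rw [if_neg hjk, ← List.getD_eq_getElem?_getD, ih]
      by_cases hjlt : j < k
      · rw [if_pos hjlt, if_pos (by omega)]
      · rw [if_neg hjlt, if_neg (by omega)]

theorem pvBodyA_eq (L S V : List Int) (k : Nat) (flg : Bool) (hkV : k < V.length) :
    pvBodyA L S (pvStepPrefix L S V k, flg) (k : Int) =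
      (pvStepPrefix L S V (k + 1),
       flg || decide (V.getD k 0 ≠ pvStep (L.getD k 0) (S.getD k 0) (V.getD k 0))) := by
  have hlen : (pvStepPrefix L S V k).length = V.length := pvStepPrefix_length L S V k
  have hread : (pvStepPrefix L S V k).getD k 0 = V.getD k 0 := by
    rw [pvStepPrefix_getD L S V k k hkV]; simp
  unfold pvBodyA
  simp only [PySem.List.pyGetD_natCast, Int.toNat_natCast, hread]
  have hset : ∀ a : Int, ((pvStepPrefix L S V k).set k a).getD k 0 = a := by
    intro a
    rw [List.getD_eq_getElem _ 0 (by simp [hlen, hkV]), List.getElem_set_self]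
  have hprefix : pvStepPrefix L S V (k + 1) =
      (pvStepPrefix L S V k).set k (pvStep (L.getD k 0) (S.getD k 0) (V.getD k 0)) := rfl
  by_cases c1 : V.getD k 0 < L.getD k 0
  · rw [if_pos c1]
    have hs : pvStep (L.getD k 0) (S.getD k 0) (V.getD k 0) = 2 * L.getD k 0 - V.getD k 0 := by
      unfold pvStep; rw [if_pos c1]
    rw [hset, hprefix, hs]
    simp [Bool.or_comm]
  · rw [if_neg c1]
    by_cases c2 : V.getD k 0 > S.getD k 0
    · rw [if_pos c2]
      have hs : pvStep (L.getD k 0) (S.getD k 0) (V.getD k 0) = 2 * S.getD k 0 - V.getD k 0 := by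
        unfold pvStep; rw [if_neg (by omega), if_pos c2]
      rw [hset, hprefix, hs]
      simp [Bool.or_comm]
    · rw [if_neg c2]
      have hs : pvStep (L.getD k 0) (S.getD k 0) (V.getD k 0) = V.getD k 0 :=
        pvStep_id _ _ _ (by omega) (by omega)
      rw [hread, hprefix, hs]
      have hself : (pvStepPrefix L S V k).set k (V.getD k 0) = pvStepPrefix L S V k := by
        conv_lhs => rw [← hread]
        rw [List.getD_eq_getElem _ 0 (by omega)]
        exact List.set_getElem_self (by omega)
      rw [hself]
      simp

theorem pvPassA_eq (L S : List Int) (n : Nat) (V : List Int) (hV : V.length = n) :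
    pvPassA L S n V = (pvStepPrefix L S V n, pvFlag L S V n) := by
  unfold pvPassA
  suffices h : ∀ k, k ≤ n →
      (PySem.List.pyRange 0 (k : Int) 1).foldl (pvBodyA L S) (V, false) =
        (pvStepPrefix L S V k, pvFlag L S V k) from h n le_rfl
  intro k
  induction k with
  | zero =>
    intro _
    rw [Int.natCast_zero, PySem.List.pyRange_one_eq_nil le_rfl]
    simp [pvStepPrefix, pvFlag]
  | succ k ih =>
    intro hk
    rw [show ((k + 1 : Nat) : Int) = (k : Int) + 1 from by push_cast; ring,
      PySem.List.pyRange_one_succ_right (show (0 : Int) ≤ (k : Int) from Int.natCast_nonneg k),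
      List.foldl_append, ih (by omega), List.foldl_cons, List.foldl_nil,
      pvBodyA_eq L S V k _ (by omega)]
    unfold pvFlag
    rw [List.range_succ, List.any_append]
    simp

theorem pvFlag_false (L S V : List Int) (n : Nat) (h : pvFlag L S V n = false) :
    ∀ j < n, pvStep (L.getD j 0) (S.getD j 0) (V.getD j 0) = V.getD j 0 := by
  intro j hj
  unfold pvFlag at h
  rw [List.any_eq_false] at h
  have h2 := h j (List.mem_range.mpr hj)
  simp only [decide_eq_true_eq] at h2
  exact (not_ne_iff.mp h2).symm

theorem pvFlag_true (L S V : List Int) (n : Nat) (h : pvFlag L S V n = true) :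
    ∃ j < n, pvStep (L.getD j 0) (S.getD j 0) (V.getD j 0) ≠ V.getD j 0 := by
  unfold pvFlag at h
  rw [List.any_eq_true] at h
  obtain ⟨j, hj, hne⟩ := h
  simp only [decide_eq_true_eq] at hne
  exact ⟨j, List.mem_range.mp hj, fun e => hne e.symm⟩

theorem pvLoop_eq (L S : List Int) (n : Nat) :
    ∀ fuel V, V.length = n →
    (∀ j < n, L.getD j 0 < S.getD j 0 ∨ (L.getD j 0 ≤ V.getD j 0 ∧ V.getD j 0 ≤ S.getD j 0)) →
    (∀ j < n, pvDist (L.getD j 0) (S.getD j 0) (V.getD j 0) < fuel) →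
    pvLoopA L S n fuel V = pvTarget L S n V := by
  intro fuel
  induction fuel with
  | zero =>
    intro V hV hinv hd
    cases n with
    | zero =>
      have : V = [] := List.eq_nil_of_length_eq_zero hV
      subst this
      simp [pvLoopA, pvTarget]
    | succ m => exact absurd (hd 0 (by omega)) (by omega)
  | succ fuel ih =>
    intro V hV hinv hd
    show (let st := pvPassA L S n V; if st.2 then pvLoopA L S n fuel st.1 else st.1) = pvTarget L S n V
    rw [pvPassA_eq L S n V hV]
    by_cases hflag : pvFlag L S V n = true
    · rw [if_pos hflag]
      -- at least one element moved, so fuel ≥ 1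
      obtain ⟨j0, hj0, hne0⟩ := pvFlag_true L S V n hflag
      have hout0 : ¬ (L.getD j0 0 ≤ V.getD j0 0 ∧ V.getD j0 0 ≤ S.getD j0 0) := by
        intro hin
        exact hne0 (pvStep_id _ _ _ hin.1 hin.2)
      have hd0 : 1 ≤ pvDist (L.getD j0 0) (S.getD j0 0) (V.getD j0 0) := by
        unfold pvDist; rcases hout0 with _
        split_ifs <;> omega
      have hfuel1 : 1 ≤ fuel := by
        have := hd j0 hj0
        omega
      have hGget : ∀ j < n, (pvStepPrefix L S V n).getD j 0 =
          pvStep (L.getD j 0) (S.getD j 0) (V.getD j 0) := by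
        intro j hj
        rw [pvStepPrefix_getD L S V n j (by omega), if_pos hj]
      rw [ih (pvStepPrefix L S V n) (by rw [pvStepPrefix_length]; exact hV) ?_ ?_]
      · unfold pvTarget
        apply List.map_congr_left
        intro j hj
        have hjn := List.mem_range.mp hj
        rw [hGget j hjn]
        rcases hinv j hjn with hlt | hin
        · exact pvFold_step _ _ _ hlt
        · rw [pvStep_id _ _ _ hin.1 hin.2]
      · intro j hj
        rw [hGget j hj]
        rcases hinv j hj with hlt | hin
        · exact Or.inl hlt
        · rw [pvStep_id _ _ _ hin.1 hin.2]
          exact Or.inr hin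
      · intro j hj
        rw [hGget j hj]
        by_cases hin : L.getD j 0 ≤ V.getD j 0 ∧ V.getD j 0 ≤ S.getD j 0
        · rw [pvStep_id _ _ _ hin.1 hin.2, pvDist_in _ _ _ hin.1 hin.2]
          omega
        · have hlt : L.getD j 0 < S.getD j 0 := by
            rcases hinv j hj with hlt | hin'
            · exact hlt
            · exact absurd hin' hin
          have := pvDist_step (L.getD j 0) (S.getD j 0) (V.getD j 0) hlt hin
          have := hd j hj
          omega
    · rw [if_neg hflag]
      have hfix := pvFlag_false L S V n (by simpa using hflag)
      apply List.ext_getElem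
      · rw [pvStepPrefix_length, hV]
        unfold pvTarget
        simp
      · intro i h1 h2
        have hin : i < n := by
          rw [pvStepPrefix_length, hV] at h1; exact h1
        rw [← List.getD_eq_getElem _ 0 h1, pvStepPrefix_getD L S V n i (by omega), if_pos hin]
        rw [hfix i hin]
        unfold pvTarget
        rw [List.getElem_map, List.getElem_range]
        have hrange := pvStep_fix _ _ _ (hfix i hin)
        rw [pvFold_in _ _ _ hrange.1 hrange.2]

theorem pvSumAbs_getD_le (l : List Int) (j : Nat) (h : j < l.length) :
    (l.getD j 0).natAbs ≤ pvSumAbs l := by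
  have hsum : pvSumAbs l = (l.map Int.natAbs).sum := by
    unfold pvSumAbs
    rw [PySem.List.foldl_add_nat]
    simp
  rw [hsum]
  have hm : (l.getD j 0).natAbs ∈ l.map Int.natAbs := by
    rw [List.getD_eq_getElem l 0 h]
    exact List.mem_map_of_mem (List.getElem_mem h)
  exact List.single_le_sum (fun x _ => Nat.zero_le x) _ hm

-- ===== VERDICT (by name: the statement is the Claim_ definition above) =====
theorem Excedentes_spec : Claim_equal_Excedentes := by
  unfold Claim_equal_Excedentes
  intro v L S _ hpre
  unfold Spec_Excedentes
  rcases hpre with ⟨hL, hS, hinv⟩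
  unfold Excedentes
  rw [pvLoop_eq L S v.length _ v rfl hinv ?_]
  · unfold pvTarget Excedentes_alt
    apply List.ext_getElem
    · simp
      omega
    · intro i h1 h2
      have hi : i < v.length := by simpa using h1
      have hiL : i < L.length := by omega
      have hiS : i < S.length := by omega
      rw [List.getElem_map, List.getElem_range, List.getElem_map, List.getElem_zip, List.getElem_zip]
      simp only
      rw [List.getD_eq_getElem L 0 hiL, List.getD_eq_getElem S 0 hiS, List.getD_eq_getElem v 0 hi]
  · intro j hj
    have hv := pvSumAbs_getD_le v j hj
    have hLj := pvSumAbs_getD_le L j (by omega)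
    have hSj := pvSumAbs_getD_le S j (by omega)
    unfold pvDist
    split_ifs <;> omega
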